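-- pv_equiv track=rewrite | github.com/ftagliaca/aoc2025 | day06/part2.py | parse_numbers_split_2d
-- ===== SOURCE A (Python) =====
-- def parse_numbers_split_2d(s: str) -> list[list[int]]:
--     s_split = s.splitlines()
--     line_len = len(s_split[0])
--     n_rows = len(s_split) - 1
--     nums = []
--     nums_col = []
--     for i in range(line_len - 1, -1, -1):
--         num = 0
--         for j in range(n_rows):
--             if (n := s_split[j][i]) != ' ':
--                 if num == 0:
--                     num = int(n)
--                 else:
--                     num = int(n) + (num * 10)
--         if num == 0:
--             nums.append(nums_col)
--             nums_col = []
--         else: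
--             nums_col.append(num)
--     if len(nums_col) > 0:
--         nums.append(nums_col)
--     return nums
-- ===== SOURCE B (Python) =====
-- def parse_numbers_split_2d(s: str) -> list[list[int]]:
--     rows = s.splitlines()
--     width = len(rows[0])
--     # pass 1: ROW-major sweep — one pass over the body rows updating all column
--     # accumulators at once (A goes column by column with a nested row loop)
--     vals = [0] * width
--     for row in rows[:-1]:
--         vals = [v * 10 + int(ch) if ch != ' ' else v for v, ch in zip(vals, row)]
--     # pass 2: reverse to A's right-to-left order and split at the zeros by slicing
--     rvals = vals[::-1]
--     groups = []
--     start = 0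
--     for k, v in enumerate(rvals):
--         if v == 0:
--             groups.append(rvals[start:k])
--             start = k + 1
--     tail = rvals[start:]
--     if tail:
--         groups.append(tail)
--     return groups
-- ===== Notes on version B (the rewrite author's own statement) =====
-- stated objective: alternative
-- what changed: B replaces A's column-major nested loops (for each column an inner scan over rows, with grouping interleaved into the parsing loop) by a row-major single sweep that updates all column accumulators at once via zip, then reverses the value vector and groups it in a separate pass by slicing at its zero entries.
import Mathlib
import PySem

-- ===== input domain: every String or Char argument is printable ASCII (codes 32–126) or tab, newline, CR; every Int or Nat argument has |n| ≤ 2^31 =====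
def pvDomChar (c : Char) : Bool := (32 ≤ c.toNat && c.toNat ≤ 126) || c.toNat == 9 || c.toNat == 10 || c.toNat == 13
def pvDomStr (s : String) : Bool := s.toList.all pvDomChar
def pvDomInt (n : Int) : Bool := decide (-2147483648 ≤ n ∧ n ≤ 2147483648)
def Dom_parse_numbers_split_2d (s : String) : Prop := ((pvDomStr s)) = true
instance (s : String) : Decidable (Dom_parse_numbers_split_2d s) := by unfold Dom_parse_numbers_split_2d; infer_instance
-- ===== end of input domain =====

-- B replaces A's column-major nested loops by a row-major sweep updating all column
-- accumulators at once (zip), then groups the reversed value vector in a separate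
-- slicing pass (objective: alternative decomposition, not faster).

-- ===== PORT A =====
-- int(ch) on a single character is ported as PySem.Int.ofChars? [ch] (exact: none = ValueError).
def parse_numbers_split_2d (s : String) : List (List Int) :=
  let s_split := PySem.Chars.splitlines s.toList
  let line_len : Int := PySem.List.len (PySem.List.pyGetD s_split 0 [])
  let n_rows : Int := PySem.List.len s_split - 1
  let st :=
    (PySem.List.pyRange (line_len - 1) (-1) (-1)).foldl
      (fun st i =>
        let num :=
          (PySem.List.pyRange 0 n_rows 1).foldl
            (fun num j =>
              let n := PySem.List.pyGetD (PySem.List.pyGetD s_split j []) i ' '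
              if n ≠ ' ' then
                if num = 0 then (PySem.Int.ofChars? [n]).getD 0
                else (PySem.Int.ofChars? [n]).getD 0 + num * 10
              else num)
            (0 : Int)
        if num = 0 then (st.1 ++ [st.2], ([] : List Int))
        else (st.1, st.2 ++ [num]))
      (([] : List (List Int)), ([] : List Int))
  if st.2.length > 0 then st.1 ++ [st.2] else st.1

-- ===== PORT B =====
-- vals[::-1] is ported as .reverse (PySem.List.slice?_none_none_neg_one); [0]*width as List.replicate.
def parse_numbers_split_2d_alt (s : String) : List (List Int) :=
  let rows := PySem.Chars.splitlines s.toList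
  let width := (PySem.List.pyGetD rows 0 []).length
  let vals :=
    (PySem.List.slice rows none (some (-1))).foldl
      (fun vals row =>
        (vals.zip row).map (fun vc =>
          if vc.2 ≠ ' ' then vc.1 * 10 + (PySem.Int.ofChars? [vc.2]).getD 0 else vc.1))
      (List.replicate width (0 : Int))
  let rvals := vals.reverse
  let st :=
    (PySem.List.enumerate rvals 0).foldl
      (fun st kv =>
        if kv.2 = 0 then
          (st.1 ++ [PySem.List.slice rvals (some st.2) (some kv.1)], kv.1 + 1)
        else st)
      (([] : List (List Int)), (0 : Int))
  let tail := PySem.List.slice rvals (some st.2) none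
  if tail ≠ [] then st.1 ++ [tail] else st.1

-- ===== PRECONDITION & SPEC =====
-- Pre_ excludes exactly the inputs where Python A raises: the empty string (IndexError on
-- s.splitlines()[0]) and grids where one of the first len-1 rows is shorter than row 0
-- (IndexError) or carries a non-space non-digit character in the first len(row 0) positions
-- (ValueError from int). The last line is never indexed by A, so it is unconstrained.
def Pre_parse_numbers_split_2d (s : String) : Prop :=
  (let rows := PySem.Chars.splitlines s.toList
   !rows.isEmpty &&
     (rows.take (rows.length - 1)).all (fun r =>
       decide ((rows.headD []).length ≤ r.length) &&
         (r.take (rows.headD []).length).all (fun c => c == ' ' || c.isDigit))) = true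
instance (s : String) : Decidable (Pre_parse_numbers_split_2d s) := by
  unfold Pre_parse_numbers_split_2d; infer_instance
def pvWitness_parse_numbers_split_2d : String := "1 2\n3 4\n"

def Spec_parse_numbers_split_2d (s : String) (out : List (List Int)) : Prop := out = parse_numbers_split_2d_alt s
instance (s : String) (out : List (List Int)) : Decidable (Spec_parse_numbers_split_2d s out) := by unfold Spec_parse_numbers_split_2d; infer_instance

-- ===== CLAIM (what is proved, stated in full; the proofs are below) =====
def Claim_equal_parse_numbers_split_2d : Prop := ∀ (s : String), Dom_parse_numbers_split_2d s → Pre_parse_numbers_split_2d s → Spec_parse_numbers_split_2d s (parse_numbers_split_2d s)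

-- ===== LEMMAS AND PROOFS =====

-- One cell update (the common arithmetic both programs perform on a character).
def pvCell (v : Int) (c : Char) : Int :=
  if c ≠ ' ' then v * 10 + (PySem.Int.ofChars? [c]).getD 0 else v

-- One step of B's row-major sweep.
def pvRowStep (vals : List Int) (row : List Char) : List Int :=
  (vals.zip row).map (fun vc => pvCell vc.1 vc.2)

-- The grouping step of A's single loop, as a function of the already-computed column value.
def pvGroupStep (st : List (List Int) × List Int) (v : Int) : List (List Int) × List Int :=
  if v = 0 then (st.1 ++ [st.2], ([] : List Int)) else (st.1, st.2 ++ [v])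

-- One step of B's slicing pass.
def pvStepB (vs : List Int) (st : List (List Int) × Int) (kv : Int × Int) : List (List Int) × Int :=
  if kv.2 = 0 then (st.1 ++ [PySem.List.slice vs (some st.2) (some kv.1)], kv.1 + 1) else st

-- The two final flushes.
def pvFinishB (vs : List Int) (st : List (List Int) × Int) : List (List Int) :=
  let tail := PySem.List.slice vs (some st.2) none
  if tail ≠ [] then st.1 ++ [tail] else st.1

def pvFinishA (st : List (List Int) × List Int) : List (List Int) :=
  if st.2.length > 0 then st.1 ++ [st.2] else st.1

-- B's row-major sweep computes, per column, the column-major fold.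
lemma pv_exchange (body : List (List Char)) :
    ∀ (init : List Int), (∀ r ∈ body, init.length ≤ r.length) →
      body.foldl pvRowStep init =
        (List.range init.length).map (fun (k : Nat) =>
          body.foldl (fun v r => pvCell v (PySem.List.pyGetD r (k : Int) ' ')) (init.getD k 0)) := by
  induction body with
  | nil =>
    intro init _
    simp only [List.foldl_nil]
    apply List.ext_getElem (by simp)
    intro k hk hk2
    rw [List.getElem_map, List.getElem_range, List.getD_eq_getElem?_getD,
      List.getElem?_eq_getElem hk]
    rfl
  | cons r rest ih =>
    intro init hlen
    have hr : init.length ≤ r.length := hlen r (by simp)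
    have hlen' : (pvRowStep init r).length = init.length := by
      simp [pvRowStep]; omega
    have hstep : ∀ k : Nat, k < init.length →
        (pvRowStep init r).getD k 0 = pvCell (init.getD k 0) (PySem.List.pyGetD r (k : Int) ' ') := by
      intro k hk
      have hkz : k < (init.zip r).length := by simp; omega
      have hkr : k < r.length := by omega
      rw [PySem.List.pyGetD_natCast, List.getD_eq_getElem?_getD,
        List.getD_eq_getElem?_getD, List.getD_eq_getElem?_getD,
        List.getElem?_eq_getElem (l := pvRowStep init r) (by omega),
        List.getElem?_eq_getElem (l := init) hk,
        List.getElem?_eq_getElem (l := r) hkr]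
      simp [pvRowStep, List.getElem_zip]
    rw [List.foldl_cons, ih (pvRowStep init r)
      (by intro r' hr'; rw [hlen']; exact hlen r' (by simp [hr']))]
    rw [hlen']
    apply List.map_congr_left
    intro k hk
    have hk' : k < init.length := by simpa using hk
    rw [hstep k hk', List.foldl_cons]

-- A's inner (column) loop equals the column-major fold over the body rows.
lemma pv_column (rows : List (List Char)) (hne : rows ≠ []) (i : Int) :
    (PySem.List.pyRange 0 (PySem.List.len rows - 1) 1).foldl
      (fun num j =>
        let n := PySem.List.pyGetD (PySem.List.pyGetD rows j []) i ' '
        if n ≠ ' ' then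
          if num = 0 then (PySem.Int.ofChars? [n]).getD 0
          else (PySem.Int.ofChars? [n]).getD 0 + num * 10
        else num)
      (0 : Int)
    = rows.dropLast.foldl (fun v r => pvCell v (PySem.List.pyGetD r i ' ')) 0 := by
  have hlen : (rows.dropLast.length : Int) = PySem.List.len rows - 1 := by
    rw [PySem.List.len_eq, List.length_dropLast]
    have : 1 ≤ rows.length := List.length_pos_iff.mpr hne
    omega
  rw [← hlen]
  rw [show (PySem.List.pyRange 0 (rows.dropLast.length : Int) 1).foldl
      (fun num j =>
        let n := PySem.List.pyGetD (PySem.List.pyGetD rows j []) i ' '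
        if n ≠ ' ' then
          if num = 0 then (PySem.Int.ofChars? [n]).getD 0
          else (PySem.Int.ofChars? [n]).getD 0 + num * 10
        else num)
      (0 : Int)
    = (PySem.List.pyRange 0 (rows.dropLast.length : Int) 1).foldl
      (fun num j => pvCell num (PySem.List.pyGetD (PySem.List.pyGetD rows.dropLast j []) i ' '))
      (0 : Int) from ?_]
  · exact PySem.List.foldl_pyRange_zero_pyGetD' rows.dropLast []
      (fun v r => pvCell v (PySem.List.pyGetD r i ' ')) 0
  · apply PySem.List.foldl_congr_mem
    intro acc j hj
    have hj' := PySem.List.mem_pyRange_one.mp hj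
    have hjlt : j < (rows.dropLast.length : Int) := hj'.2
    have hjr : j < (rows.length : Int) := by
      have := @List.length_dropLast _ rows; omega
    have hget : PySem.List.pyGetD rows j [] = PySem.List.pyGetD rows.dropLast j [] := by
      rw [PySem.List.pyGetD_eq_getElem rows [] hj'.1 hjr,
        PySem.List.pyGetD_eq_getElem rows.dropLast [] hj'.1 hjlt,
        List.getElem_dropLast]
    rw [hget]
    dsimp only [pvCell]
    by_cases hsp : PySem.List.pyGetD (PySem.List.pyGetD rows.dropLast j []) i ' ' = ' '
    · simp [hsp]
    · simp only [ne_eq, hsp, not_false_iff, if_pos]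
      by_cases hz : acc = 0
      · simp [hz]
      · simp [hz]; omega

-- B's slicing pass over the value list computes the same groups as A's accumulator pass.
lemma pv_group_loop (vs : List Int) :
    ∀ (suf : List Int) (k start : Nat) (nums : List (List Int)),
      start ≤ k → vs.drop k = suf →
      pvFinishB vs ((PySem.List.enumerate suf (k : Int)).foldl (pvStepB vs) (nums, (start : Int)))
        = pvFinishA (suf.foldl pvGroupStep
            (nums, PySem.List.slice vs (some (start : Int)) (some (k : Int)))) := by
  intro suf
  induction suf with
  | nil =>
    intro k start nums hsk hdrop
    have hlen : vs.length ≤ k := by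
      have := congrArg List.length hdrop; simp at this; omega
    simp only [PySem.List.enumerate_nil, List.foldl_nil, pvFinishA, pvFinishB,
      PySem.List.slice_from_natCast, PySem.List.slice_natCast]
    have htake : (vs.drop start).take (k - start) = vs.drop start := by
      apply List.take_of_length_le; simp; omega
    rw [htake]
    by_cases h : vs.drop start = []
    · simp [h]
    · have hlt : start < vs.length := by
        by_contra hc
        exact h (List.drop_eq_nil_of_le (by omega))
      simp [h, hlt]
  | cons v suf ih =>
    intro k start nums hsk hdrop
    have hk : k < vs.length := by
      by_contra h
      rw [List.drop_eq_nil_of_le (by omega)] at hdrop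
      exact List.cons_ne_nil _ _ hdrop.symm
    have hdrop' : vs.drop (k + 1) = suf := by
      have h1 : vs.drop (k + 1) = (vs.drop k).drop 1 := by rw [List.drop_drop]
      rw [h1, hdrop]; rfl
    have hget : vs[k]? = some v := by
      have h0 : (vs.drop k)[0]? = some v := by rw [hdrop]; rfl
      simpa using h0
    have hcast : ((k : Int) + 1) = (((k + 1 : Nat)) : Int) := by push_cast; ring
    simp only [PySem.List.enumerate_cons, List.foldl_cons]
    by_cases hv : v = 0
    · subst hv
      have hstep : pvStepB vs (nums, (start : Int)) ((k : Int), 0)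
          = (nums ++ [PySem.List.slice vs (some (start : Int)) (some (k : Int))],
             (k : Int) + 1) := by
        simp [pvStepB]
      have hslice : ([] : List Int)
          = PySem.List.slice vs (some ((k + 1 : Nat) : Int)) (some ((k + 1 : Nat) : Int)) := by
        rw [PySem.List.slice_natCast]; simp
      rw [hstep, hcast, ih (k + 1) (k + 1) _ (le_refl _) hdrop']
      have hg : pvGroupStep (nums, PySem.List.slice vs (some (start : Int)) (some (k : Int))) 0
          = (nums ++ [PySem.List.slice vs (some (start : Int)) (some (k : Int))], []) := by
        simp [pvGroupStep]
      rw [hg, ← hslice]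
    · have hstep : pvStepB vs (nums, (start : Int)) ((k : Int), v) = (nums, (start : Int)) := by
        rw [pvStepB]; simp [hv]
      have h2 : PySem.List.slice vs (some (start : Int)) (some ((k + 1 : Nat) : Int))
          = PySem.List.slice vs (some (start : Int)) (some (k : Int)) ++ [v] := by
        rw [PySem.List.slice_natCast, PySem.List.slice_natCast]
        have hm : k + 1 - start = (k - start) + 1 := by omega
        rw [hm, List.take_add_one]
        have hidx : (vs.drop start)[k - start]? = some v := by
          rw [List.getElem?_drop]
          have hsum : start + (k - start) = k := by omega
          rw [hsum, hget]
        simp [hidx]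
      have hg : pvGroupStep (nums, PySem.List.slice vs (some (start : Int)) (some (k : Int))) v
          = (nums, PySem.List.slice vs (some (start : Int)) (some (k : Int)) ++ [v]) := by
        simp [pvGroupStep, hv]
      rw [hstep, hcast, ih (k + 1) start _ (by omega) hdrop', hg, h2]

-- ===== VERDICT (by name: the statement is the Claim_ definition above) =====
theorem parse_numbers_split_2d_spec : Claim_equal_parse_numbers_split_2d := by
  intro s _hdom hpre
  unfold Pre_parse_numbers_split_2d at hpre
  unfold Spec_parse_numbers_split_2d parse_numbers_split_2d parse_numbers_split_2d_alt
  dsimp only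
  set rows := PySem.Chars.splitlines s.toList with hrows
  simp only [Bool.and_eq_true, List.all_eq_true, Bool.not_eq_eq_eq_not] at hpre
  obtain ⟨hne0, hrows_ok⟩ := hpre
  have hne : rows ≠ [] := by simpa using hne0
  have hbody_of_take : rows.take (rows.length - 1) = rows.dropLast := by
    rw [List.dropLast_eq_take]
  set body := rows.dropLast with hbody
  set width := (PySem.List.pyGetD rows 0 []).length with hwidth
  have hhead : PySem.List.pyGetD rows 0 [] = rows.headD [] := by
    rw [show ((0 : Int)) = ((0 : Nat) : Int) from rfl, PySem.List.pyGetD_natCast]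
    cases rows with
    | nil => rfl
    | cons a l => rfl
  have hrlen : ∀ r ∈ body, width ≤ r.length := by
    intro r hr
    rw [← hbody_of_take] at hr
    have := (hrows_ok r hr).1
    rw [hwidth, hhead]
    exact_mod_cast of_decide_eq_true (by simpa using this)
  -- the per-column value, as the column-major fold over body
  set g : Int → Int := fun i =>
    body.foldl (fun v r => pvCell v (PySem.List.pyGetD r i ' ')) 0 with hg
  -- A's inner loop computes g i
  have hinner : ∀ i : Int,
      (PySem.List.pyRange 0 (PySem.List.len rows - 1) 1).foldl
        (fun num j =>
          let n := PySem.List.pyGetD (PySem.List.pyGetD rows j []) i ' '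
          if n ≠ ' ' then
            if num = 0 then (PySem.Int.ofChars? [n]).getD 0
            else (PySem.Int.ofChars? [n]).getD 0 + num * 10
          else num)
        (0 : Int) = g i := fun i => pv_column rows hne i
  -- A's single loop = group-step fold over the mapped column values
  have hA : (PySem.List.pyRange (PySem.List.len (PySem.List.pyGetD rows 0 []) - 1) (-1) (-1)).foldl
      (fun st i =>
        let num :=
          (PySem.List.pyRange 0 (PySem.List.len rows - 1) 1).foldl
            (fun num j =>
              let n := PySem.List.pyGetD (PySem.List.pyGetD rows j []) i ' '
              if n ≠ ' ' then
                if num = 0 then (PySem.Int.ofChars? [n]).getD 0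
                else (PySem.Int.ofChars? [n]).getD 0 + num * 10
              else num)
            (0 : Int)
        if num = 0 then (st.1 ++ [st.2], ([] : List Int))
        else (st.1, st.2 ++ [num]))
      (([] : List (List Int)), ([] : List Int))
      = ((PySem.List.pyRange (PySem.List.len (PySem.List.pyGetD rows 0 []) - 1) (-1) (-1)).map g).foldl
          pvGroupStep (([] : List (List Int)), ([] : List Int)) := by
    rw [List.foldl_map]
    apply PySem.List.foldl_congr_mem
    intro st i _hi
    dsimp only
    rw [hinner i, pvGroupStep]
  rw [hA]
  -- B's vals is the per-column value list, left to right
  have hslice_body : PySem.List.slice rows none (some (-1)) = body := PySem.List.slice_to_neg_one rows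
  have hvals : (PySem.List.slice rows none (some (-1))).foldl
      (fun vals row =>
        (vals.zip row).map (fun vc =>
          if vc.2 ≠ ' ' then vc.1 * 10 + (PySem.Int.ofChars? [vc.2]).getD 0 else vc.1))
      (List.replicate width (0 : Int))
      = (List.range width).map (fun (k : Nat) => g (k : Int)) := by
    rw [hslice_body]
    rw [show (fun (vals : List Int) (row : List Char) =>
        (vals.zip row).map (fun vc =>
          if vc.2 ≠ ' ' then vc.1 * 10 + (PySem.Int.ofChars? [vc.2]).getD 0 else vc.1))
      = pvRowStep from rfl]
    rw [pv_exchange body (List.replicate width 0) (by simpa using hrlen)]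
    simp only [List.length_replicate]
    apply List.map_congr_left
    intro k hk
    have hz : (List.replicate width (0 : Int)).getD k 0 = 0 := by
      rw [List.getD_eq_getElem?_getD, List.getElem?_replicate]
      split_ifs <;> rfl
    rw [hz, hg]
  rw [hvals]
  -- A's reversed-range map = the reverse of B's vals
  have hR : (PySem.List.pyRange (PySem.List.len (PySem.List.pyGetD rows 0 []) - 1) (-1) (-1)).map g
      = ((List.range width).map (fun (k : Nat) => g (k : Int))).reverse := by
    rw [PySem.List.len_eq, ← hwidth]
    rw [show ((width : Int) - 1) = (width : Int) - 1 from rfl]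
    rw [PySem.List.pyRange_neg_one_eq_reverse]
    rw [show ((-1 : Int) + 1) = 0 from rfl, show ((width : Int) - 1 + 1) = (width : Int) by ring]
    rw [PySem.List.pyRange_one, List.map_reverse, List.map_map]
    congr 1
    rw [show ((width : Int) - 0).toNat = width by omega]
    apply List.map_congr_left
    intro k _hk
    simp
  rw [hR]
  -- B's slicing pass = A's accumulator pass, by the loop lemma at k = start = 0
  set rvals := ((List.range width).map (fun (k : Nat) => g (k : Int))).reverse with hrvals
  have hmain := pv_group_loop rvals rvals 0 0 [] (le_refl 0) (by simp)
  have hslice0 : PySem.List.slice rvals (some ((0 : Nat) : Int)) (some ((0 : Nat) : Int))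
      = ([] : List Int) := by rw [PySem.List.slice_natCast]; simp
  rw [hslice0] at hmain
  simp only [Nat.cast_zero] at hmain
  simp only [pvFinishA, pvFinishB] at hmain
  exact hmain.symm
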